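/- GENERATED by mk_final_copies.py from the proof of the farm's unit `start_decoder.C11g` (farm:start_decoder.C11g.1: Proof.lean) as the
   re-elaboration sweep compiled it — do not edit. -/
import Asan.CheckWalk
import Vorbis.Spec.Reader
import Vorbis.Spec.StartDecoderC4
import Vorbis.Spec.Units.start_decoder_C11g
import Vorbis.Spec.Worked.start_decoder_C11g_Lemmas

open X86 X86.User Asan Vorbis Vorbis.Spec Vorbis.Spec.StartDecoder

set_option maxRecDepth 100000
set_option maxHeartbeats 4000000

namespace Vorbis.Spec.start_decoder_C11g

/-- **Segment C11g of `start_decoder`** (`cut158` 0x114cd0, the return of `get_bits(f, c->value_bits)`; line 3893): `eax < 2^16` is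
not EOP, so the `je 0x114d86` of 0x114cd6 is not taken (the walker prunes that arm from `cnt32_part q` and `q < 2^16`: the stub
0x114d86 … 0x114db4 is dead code here, the exit `AtERR` is never used); then the checked 2-byte store `mults[j] = q` of line 3895
(0x114ced / 0x114cf2: inside the temp block `TBlock(mults, 2·LV)` since `j < LV`), `++j`, and the jump back to the head `loop11`
0x114ca3, where `carry_mults` re-establishes `In11L` with `j + 1`. -/
theorem segC11g_walk {Lay : Layout} (hLay : Lay.hi = 0x1000000) {μ : Microarch} (hμ : UserX.MicroOK μ) {u₀ : State}
    (hcode : HasCodeNat Lay u₀ Vorbis.L.start_decoder.entry Vorbis.Code.code_start_decoder.nat Vorbis.L.start_decoder.size)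
    (hst2 : Asan.SmallCheck Lay μ Vorbis.WayInv (Vorbis.CodeOK u₀) [.rax, .rcx, .rdx] 2 Vorbis.L.__asan_store2_noabort.entry)
    {g : Ghost} {i : Nat} {A2 A3 Ai : Arena} {A : Arena × List Obj} {mults n j : Nat} {v : State}
    (hat : In11L u₀ g i A2 A3 Ai A mults n j Vorbis.L.start_decoder.cut158 v) (hjn : j < n)
    (hq16 : (v.reg .rax).toNat < 2 ^ 16) :
    ReachVia Lay μ WayInv v (fun w => At11L u₀ g i n (j + 1) Vorbis.L.start_decoder.loop11 w ∨ AtERR u₀ g w) := by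
  have hfr := hat.frame
  have he := hfr.entry
  v_entry he
  simp only [depth] at he_room he_stack
  have w_rip := hfr.rip
  obtain ⟨hr1, hr2⟩ := hfr.r_eq
  simp only [steady] at hr1
  have hRA : g.RA = (g.e.reg .rsp).toNat := rfl
  have c_rsp : v.reg .rsp = g.e.reg .rsp - 1480 := by
    rw [hfr.rsp]
    refine (eq_addr _ _ ?_).symm
    unfold Ghost.R Ghost.RA steady
    u_omega
  have hpos : Pos g A := Pos.of hfr hat.cur
  have ha := hat.cur.sd.arena
  have hlvlt := hat.mults.lv_lt
  have hjle := hat.j_le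
  have hlveq := hat.lv_eq
  -- the temp block `mults`
  have hT : A.1.TBlock mults (2 * Codebook.lookup_values v.mem (g.cb v.mem i)) :=
    hat.mults.temps.tblock List.mem_cons_self
  have hTr := ha.tblock_range hT
  have hTo := ha.tblock_off hT
  have c_rbp : v.reg .rbp = UInt64.ofNat j := hat.rbp
  obtain ⟨q, hq⟩ : ∃ q : Nat, (v.reg .rax).toNat = q := ⟨_, rfl⟩
  have c_rax : v.reg .rax = UInt64.ofNat q := eq_addr _ _ hq
  rw [hq] at hq16
  have sl_m : v.mem.readLE (g.e.reg .rsp - 1440) 8 = mults := by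
    have e : addr (g.R + 0x28) = g.e.reg .rsp - 1440 := by
      refine (eq_addr _ _ ?_).symm
      unfold Ghost.R Ghost.RA steady
      u_omega
    rw [← e]
    exact hat.mults.slot
  have hj31 : j < 2 ^ 31 := by omega
  have w_eq : Mem.EqOn Vorbis.L.textLo Vorbis.L.textHi u₀.mem v.mem := hfr.code
  have hdf : v.flags .df = false := (show abiInv _ from hfr.inv).1
  have hmx : v.mxcsr &&& 0x1F80 = 0x1F80 := (show abiInv _ from hfr.inv).2
  have hsse := Vorbis.sseOK_of_abiInv hfr.inv
  -- the address of `mults[j]`, as the walker computes it (`movsxd rbx,ebp ; add rbx,rbx ; add rbx,[rsp+28H]`)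
  have hadr : UInt64.ofNat j + UInt64.ofNat j + UInt64.ofNat mults = addr (mults + 2 * j) := by
    unfold addr
    rw [← UInt64.ofNat_add, ← UInt64.ofNat_add]
    congr 1
    omega
  have tadr : (addr (mults + 2 * j)).toNat = mults + 2 * j := toNat_addr _ (by omega)
  -- the arena lies above the text (the store's `side_code`, closed by `v_side`)
  have htx := hat.cur.hand.arenaText
  simp only [Vorbis.L.textHi] at htx
  have t1 : (g.e.reg .rsp - 1488).toNat = (g.e.reg .rsp).toNat - 1488 := by u_omega
  u_walk hcode [hμ.vendor, cnt32_part j, cnt32_sext_bv j hj31, cnt32_part q, hadr] until [Vorbis.L.start_decoder.loop11] span [Vorbis.L.textLo, Vorbis.L.textHi] side (v_side)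
  case check_114ced =>
    -- `mults[j]`, `j < LV`: inside the temp block `TBlock(mults, 2·LV)`
    have hun : ShadowUntouched v.mem s_114ced.mem := by v_untouched
    have hsh' := hfr.shadow.untouched hun
    refine ⟨hsh'.sealed, ?_⟩
    rw [tadr]
    exact ha.tblock_acc_inv hsh' hT (by omega) (by omega) (by decide)
  case cont =>
    -- 0x114ca3, the head of the loop with `j + 1`: the push of the check call and the store into `mults`
    have hall : Mem.SameExcept [⟨g.R - 408, g.R⟩, ⟨mults + 2 * j, mults + 2 * j + 2⟩] v.mem s_114cf9.mem := by
      rw [w_mem]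
      refine Mem.SameExcept.trans (ν := v.mem.writeLE (g.e.reg .rsp - 1488) 8 1133810) ?_ ?_
      · refine Mem.SameExcept.writeLE _ v.mem _ 8 _ ?_ ⟨⟨g.R - 408, g.R⟩, List.mem_cons_self, ?_, ?_⟩
        · rw [t1]
          omega
        · rw [t1]
          show g.R - 408 ≤ _
          omega
        · rw [t1]
          show _ ≤ g.R
          omega
      · refine Mem.SameExcept.writeLE _ _ _ 2 _ ?_
          ⟨⟨mults + 2 * j, mults + 2 * j + 2⟩, List.mem_cons_of_mem _ List.mem_cons_self, ?_, ?_⟩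
        · rw [tadr]
          omega
        · rw [tadr]
          exact Nat.le_refl _
        · rw [tadr]
          exact Nat.le_refl _
    have hq : ∀ x, x ∈ [(⟨g.R - 408, g.R⟩ : Span), ⟨mults + 2 * j, mults + 2 * j + 2⟩] →
        MultsWin g mults (Codebook.lookup_values v.mem (g.cb v.mem i)) x := by
      intro x hx
      simp only [List.mem_cons, List.mem_nil_iff, or_false] at hx
      rcases hx with rfl | rfl
      · left
        unfold C11.QuietWinL
        left
        exact ⟨Nat.le_refl _, Nat.le_refl _⟩
      · right
        show mults ≤ mults + 2 * j ∧ mults + 2 * j + 2 ≤ mults + 2 * Codebook.lookup_values v.mem (g.cb v.mem i)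
        omega
    have hun : ShadowUntouched v.mem s_114cf9.mem := by v_untouched
    have hb : Bits (g.Blk A) g.len s_114cf9.mem g.f := by
      apply bits_kept hpos hat.cur.sd.bits hall
      intro x hx
      simp only [List.mem_cons, List.mem_nil_iff, or_false] at hx
      rcases hx with rfl | rfl
      · left
        show g.R - 408 ≤ g.R - 408 ∧ g.R ≤ g.R + 0x598
        omega
      · right
        left
        show A.1.B ≤ mults + 2 * j ∧ mults + 2 * j + 2 ≤ A.1.B + A.1.L
        have hr8 := le_r8 (2 * Codebook.lookup_values v.mem (g.cb v.mem i))
        omega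
    have habi : abiInv s_114cf9 := by
      refine Vorbis.abiInv_of ?_ ?_
      · rw [w_flags]
        simp only [X86.User.df_setStatus]
        exact w_df_114ced
      · rw [w_mxcsr]
        exact hmx
    have hrsp : s_114cf9.reg .rsp = v.reg .rsp := by
      rw [w_rsp, c_rsp]
    have hrbp : s_114cf9.reg .rbp = addr (j + 1) := by
      rw [w_rbp, cnt32_succ_bv]
      exact cnt32_ofBV _ (by omega)
    have hL := carry_mults (pc' := Vorbis.L.start_decoder.loop11) (j' := j + 1) hat hall hun hq hb w_rip hrsp w_eq habi
      (w_kept .r14 rfl) hrbp (by omega)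
    exact ReachVia.done (Or.inl ⟨A, mults, A2, A3, Ai, hL⟩)

end Vorbis.Spec.start_decoder_C11g

/-- The unit `start_decoder.C11g`: `segC11g_walk` at every entry state. -/
theorem Vorbis.Spec.Worked.start_decoder_C11g_ok : Vorbis.Spec.start_decoder_C11g.Statement := by
  intro Lay hLay μ hμ u₀ hcode hld4 hst2 herr hfree g i n j v hat hjn hq16
  obtain ⟨A, mults, A2, A3, Ai, h⟩ := hat
  exact Vorbis.Spec.start_decoder_C11g.segC11g_walk hLay hμ hcode hst2 h hjn hq16
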